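-- pv_equiv track=rewrite | github.com/guojinyu12/graduation_thesis | step1_3_3.py | get_new_years
-- ===== SOURCE A (Python) =====
-- import itertools
--
-- def get_new_years(it):
--     c = itertools.count(0)
--     ls = [-1]
--     for e in it:
--         if e == 4:
--             ls.append(next(c))
--         else:
--             ls.append(ls[-1])
--     return ls[1:]
-- ===== SOURCE B (Python) =====
-- def get_new_years(it):
--     pos = [i for i, e in enumerate(it) if e == 4]
--     bounds = [0] + pos + [len(it)]
--     out = []
--     for k, (a, b) in enumerate(zip(bounds, bounds[1:])):
--         out += [k - 1] * (b - a)
--     return out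
-- ===== Notes on version B (the rewrite author's own statement) =====
-- stated objective: alternative
-- what changed: Replaces the per-element carry-forward loop (counter object + last emitted value) with a position/run-length construction: collect the indices of the 4s, turn them into segment boundaries, and emit each constant segment with list repetition; no per-element running state is kept.
import Mathlib
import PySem

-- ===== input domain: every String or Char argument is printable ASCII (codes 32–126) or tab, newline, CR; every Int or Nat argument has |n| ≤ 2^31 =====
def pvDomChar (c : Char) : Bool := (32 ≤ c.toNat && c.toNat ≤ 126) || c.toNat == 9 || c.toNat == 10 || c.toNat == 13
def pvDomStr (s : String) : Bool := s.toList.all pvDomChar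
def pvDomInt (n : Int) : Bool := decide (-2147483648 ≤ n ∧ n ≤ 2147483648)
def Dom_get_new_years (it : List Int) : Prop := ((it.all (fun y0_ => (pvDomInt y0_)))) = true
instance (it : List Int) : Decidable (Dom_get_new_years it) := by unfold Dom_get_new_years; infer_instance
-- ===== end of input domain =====

-- B replaces A's per-element carry-forward loop with a position/run-length construction:
-- collect the indices of the 4s, turn them into segment boundaries, and emit the constant
-- segments by repetition (alternative decomposition; same O(n) cost).


-- ===== PORT A =====
-- literal port of A: fold carrying (counter c, accumulated list ls starting [-1]);
-- ls[-1] on the always-nonempty ls is getLast!; ls[1:] is drop 1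
def get_new_years (it : List Int) : List Int :=
  (it.foldl (fun (st : Int × List Int) e =>
      if e == 4 then (st.1 + 1, st.2 ++ [st.1])
      else (st.1, st.2 ++ [st.2.getLast!]))
    (0, [-1])).2.drop 1

-- ===== PORT B =====
-- positions of the 4s -> boundary list -> run-length expansion of each segment
def get_new_years_alt (it : List Int) : List Int :=
  let pos := ((PySem.List.enumerate it).filter (fun p => p.2 == 4)).map (fun p => p.1)
  let bounds := 0 :: (pos ++ [(it.length : Int)])
  (PySem.List.enumerate (bounds.zip bounds.tail)).flatMap
    (fun kp => List.replicate (kp.2.2 - kp.2.1).toNat (kp.1 - 1))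

-- ===== PRECONDITION & SPEC =====
def Spec_get_new_years (it : List Int) (out : List Int) : Prop := out = get_new_years_alt it
instance (it : List Int) (out : List Int) : Decidable (Spec_get_new_years it out) := by unfold Spec_get_new_years; infer_instance

-- ===== CLAIM (what is proved, stated in full; the proofs are below) =====
def Claim_equal_get_new_years : Prop := ∀ (it : List Int), Dom_get_new_years it → Spec_get_new_years it (get_new_years it)

-- ===== LEMMAS AND PROOFS =====

-- common denotation: output for the suffix `it` when `c` fours were already seen
def pvRun (c : Int) : List Int → List Int
  | [] => []
  | x :: xs => if x = 4 then c :: pvRun (c + 1) xs else (c - 1) :: pvRun c xs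

-- absolute positions of the 4s in `it`, the first element having index s
def pvPos (s : Int) : List Int → List Int
  | [] => []
  | x :: xs => if x = 4 then s :: pvPos (s + 1) xs else pvPos (s + 1) xs

-- adjacent pairs of a list (what zip(bounds, bounds[1:]) produces)
def pvPairs : List Int → List (Int × Int)
  | a :: b :: r => (a, b) :: pvPairs (b :: r)
  | _ => []

theorem pv_zip_tail (l : List Int) : l.zip l.tail = pvPairs l := by
  match l with
  | [] => rfl
  | [a] => rfl
  | a :: b :: r =>
    show (a, b) :: (b :: r).zip r = _
    rw [pvPairs, ← pv_zip_tail (b :: r)]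
    rfl

theorem pv_filter_enumerate (it : List Int) (s : Int) :
    ((PySem.List.enumerate it s).filter (fun p => p.2 == 4)).map (fun p => p.1)
      = pvPos s it := by
  induction it generalizing s with
  | nil => rfl
  | cons x xs ih =>
    rw [PySem.List.enumerate_cons]
    by_cases h : x = 4 <;> simp [pvPos, h, ih]

theorem pv_getLast!_concat (l : List Int) (a : Int) : (l ++ [a]).getLast! = a := by
  induction l with
  | nil => rfl
  | cons x t ih =>
    cases t with
    | nil => rfl
    | cons y u => simpa using ih

-- A's loop, generalized: the carried list grows by exactly pvRun c it
theorem pv_loopA (it : List Int) (c : Int) (ls : List Int)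
    (hl : ls.getLast! = c - 1) :
    (it.foldl (fun (st : Int × List Int) e =>
        if e == 4 then (st.1 + 1, st.2 ++ [st.1])
        else (st.1, st.2 ++ [st.2.getLast!])) (c, ls)).2
      = ls ++ pvRun c it := by
  induction it generalizing c ls with
  | nil => simp [pvRun]
  | cons e rest ih =>
    simp only [beq_iff_eq] at ih ⊢
    by_cases h : e = 4
    · simp only [List.foldl_cons, h, if_true]
      rw [ih (c + 1) (ls ++ [c]) (by rw [pv_getLast!_concat]; ring)]
      simp [pvRun]
    · simp only [List.foldl_cons, h, if_false]
      rw [hl, ih c (ls ++ [c - 1]) (by rw [pv_getLast!_concat])]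
      simp [pvRun, h]

-- B's expansion, generalized: expanding the segments of the suffix starting at absolute
-- index s, with previous boundary p ≤ s and k segments already emitted, yields the tail
-- of the current segment followed by pvRun k
theorem pv_loopB (it : List Int) (s p k : Int) (hps : p ≤ s) :
    (PySem.List.enumerate (pvPairs (p :: (pvPos s it ++ [s + it.length]))) k).flatMap
        (fun kp => List.replicate (kp.2.2 - kp.2.1).toNat (kp.1 - 1))
      = List.replicate (s - p).toNat (k - 1) ++ pvRun k it := by
  induction it generalizing s p k with
  | nil =>
    simp [pvPos, pvRun, pvPairs, PySem.List.enumerate_cons, PySem.List.enumerate_nil]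
  | cons x xs ih =>
    by_cases h : x = 4
    · have : pvPos s (x :: xs) = s :: pvPos (s + 1) xs := by rw [pvPos, if_pos h]
      rw [this]
      have hlen : s + ((x :: xs).length : Int) = (s + 1) + (xs.length : Int) := by
        simp; ring
      show (PySem.List.enumerate ((p, s) :: pvPairs (s :: (pvPos (s + 1) xs ++ [s + ((x :: xs).length : Int)]))) k).flatMap _ = _
      rw [hlen, PySem.List.enumerate_cons, List.flatMap_cons,
        ih (s + 1) s (k + 1) (by omega)]
      rw [pvRun, if_pos h]
      simp [add_sub_cancel_right]
    · have : pvPos s (x :: xs) = pvPos (s + 1) xs := by rw [pvPos, if_neg h]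
      rw [this]
      have hlen : s + ((x :: xs).length : Int) = (s + 1) + (xs.length : Int) := by
        simp; ring
      rw [hlen, ih (s + 1) p k (by omega), pvRun, if_neg h]
      have : (s + 1 - p).toNat = (s - p).toNat + 1 := by omega
      rw [this, List.replicate_succ', List.append_assoc]
      rfl

-- ===== VERDICT (by name: the statement is the Claim_ definition above) =====
theorem get_new_years_spec : Claim_equal_get_new_years := by
  intro it _
  unfold Spec_get_new_years get_new_years get_new_years_alt
  rw [pv_loopA it 0 [-1] (by rfl)]
  have hb := pv_loopB it 0 0 0 le_rfl
  simp only [zero_add] at hb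
  have hz := pv_zip_tail (0 :: (pvPos 0 it ++ [(it.length : Int)]))
  rw [List.tail_cons] at hz
  simp [pv_filter_enumerate, hz, hb]
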